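-- pv_equiv track=rewrite | github.com/vibetuned/counterpoint | src/counterpoint/scores/chords.py | semitones_to_grid
-- ===== SOURCE A (Python) =====
-- from typing import List, Tuple, Optional, Dict
--
-- SEMITONE_TO_GRID = {
--     0:  (0, 0),  # C
--     1:  (0, 1),  # C#/Db
--     2:  (1, 0),  # D
--     3:  (1, 1),  # D#/Eb
--     4:  (2, 0),  # E
--     5:  (3, 0),  # F
--     6:  (3, 1),  # F#/Gb
--     7:  (4, 0),  # G
--     8:  (4, 1),  # G#/Ab
--     9:  (5, 0),  # A
--     10: (5, 1),  # A#/Bb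
--     11: (6, 0),  # B
-- }
--
-- def semitones_to_grid(semitones: List[int], octave: int = 3) -> List[Tuple[int, int]]:
--     """
--     Convert semitone values to grid positions.
--
--     Args:
--         semitones: List of semitone values (0-11)
--         octave: Starting octave (0-indexed)
--
--     Returns:
--         List of (column, is_black) tuples
--     """
--     grid_positions = []
--     current_octave = octave
--     prev_semitone = -1
--
--     for semitone in semitones:
--         # Handle octave wrapping for ascending notes
--         if semitone <= prev_semitone:
--             current_octave += 1
--         prev_semitone = semitone
--
--         col_in_octave, is_black = SEMITONE_TO_GRID[semitone]
--         column = current_octave * 7 + col_in_octave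
--         grid_positions.append((column, is_black))
--
--     return grid_positions
-- ===== SOURCE B (Python) =====
-- from typing import List, Tuple, Optional, Dict
--
-- SEMITONE_TO_GRID = {
--     0:  (0, 0),  # C
--     1:  (0, 1),  # C#/Db
--     2:  (1, 0),  # D
--     3:  (1, 1),  # D#/Eb
--     4:  (2, 0),  # E
--     5:  (3, 0),  # F
--     6:  (3, 1),  # F#/Gb
--     7:  (4, 0),  # G
--     8:  (4, 1),  # G#/Ab
--     9:  (5, 0),  # A
--     10: (5, 1),  # A#/Bb
--     11: (6, 0),  # B
-- }
--
-- def semitones_to_grid(semitones: List[int], octave: int = 3) -> List[Tuple[int, int]]: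
--     # Stage 1: wrap indicators (index 0 never wraps).
--     indicators = [0] + [1 if b <= a else 0 for a, b in zip(semitones, semitones[1:])]
--     # Stage 2: per-element octaves as a running prefix sum starting at `octave`.
--     octaves = []
--     acc = octave
--     for d in indicators:
--         acc += d
--         octaves.append(acc)
--     # Stage 3: map each (octave, semitone) pair to its grid cell.
--     return [(o * 7 + SEMITONE_TO_GRID[s][0], SEMITONE_TO_GRID[s][1])
--             for o, s in zip(octaves, semitones)]
-- ===== Notes on version B (the rewrite author's own statement) =====
-- stated objective: alternative
-- what changed: Replaces A's single stateful carry loop (current_octave/prev_semitone mutated per element) with a three-stage prefix-table decomposition: a list of wrap indicators from adjacent pairs, a prefix sum turning them into per-element octaves, and a final map zipping octaves with semitones.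
import Mathlib
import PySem

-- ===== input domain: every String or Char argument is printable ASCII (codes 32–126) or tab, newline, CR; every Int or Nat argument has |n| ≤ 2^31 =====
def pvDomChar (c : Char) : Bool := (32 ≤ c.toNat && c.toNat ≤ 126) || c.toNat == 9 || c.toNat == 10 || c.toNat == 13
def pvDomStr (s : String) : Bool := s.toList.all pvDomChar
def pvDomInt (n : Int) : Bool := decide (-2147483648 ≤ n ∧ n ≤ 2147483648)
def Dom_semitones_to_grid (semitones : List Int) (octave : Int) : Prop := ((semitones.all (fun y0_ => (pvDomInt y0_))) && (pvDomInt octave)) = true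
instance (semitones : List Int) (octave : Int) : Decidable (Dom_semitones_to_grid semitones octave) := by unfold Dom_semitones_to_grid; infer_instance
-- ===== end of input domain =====

-- B replaces A's single stateful carry loop by a wrap-indicator / prefix-sum / map
-- three-stage decomposition (alternative structure, same cost).


-- ===== PORT A =====
-- the module constant SEMITONE_TO_GRID (shared by both Pythons)
def SEMITONE_TO_GRID : PySem.Dict Int (Int × Int) :=
  PySem.Dict.ofList [(0,(0,0)), (1,(0,1)), (2,(1,0)), (3,(1,1)), (4,(2,0)), (5,(3,0)),
                     (6,(3,1)), (7,(4,0)), (8,(4,1)), (9,(5,0)), (10,(5,1)), (11,(6,0))]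

-- SEMITONE_TO_GRID[s]; the default is never reached under Pre_ (Python raises KeyError there)
def gridOf (s : Int) : Int × Int := PySem.Dict.getD SEMITONE_TO_GRID s (0, 0)

def semitones_to_grid (semitones : List Int) (octave : Int) : List (Int × Int) :=
  let r := semitones.foldl
    (fun (st : List (Int × Int) × Int × Int) semitone =>
      let current_octave := if semitone ≤ st.2.2 then st.2.1 + 1 else st.2.1
      let cb := gridOf semitone
      (st.1 ++ [(current_octave * 7 + cb.1, cb.2)], current_octave, semitone))
    ([], octave, -1)
  r.1

-- ===== PORT B =====
def semitones_to_grid_alt (semitones : List Int) (octave : Int) : List (Int × Int) :=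
  let indicators : List Int :=
    0 :: (semitones.zip semitones.tail).map (fun p => if p.2 ≤ p.1 then 1 else 0)
  let octaves :=
    (indicators.foldl (fun (st : Int × List Int) d => (st.1 + d, st.2 ++ [st.1 + d]))
      (octave, [])).2
  (octaves.zip semitones).map (fun p => (p.1 * 7 + (gridOf p.2).1, (gridOf p.2).2))

-- ===== PRECONDITION & SPEC =====
-- Pre_: exactly the inputs on which Python A returns (out-of-range semitones raise KeyError).
def Pre_semitones_to_grid (semitones : List Int) (octave : Int) : Prop :=
  ∀ s ∈ semitones, 0 ≤ s ∧ s ≤ 11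
instance (semitones : List Int) (octave : Int) : Decidable (Pre_semitones_to_grid semitones octave) := by unfold Pre_semitones_to_grid; infer_instance

def pvWitness_semitones_to_grid : List Int × Int := ([0, 4, 7, 0, 2], 3)

def Spec_semitones_to_grid (semitones : List Int) (octave : Int) (out : List (Int × Int)) : Prop := out = semitones_to_grid_alt semitones octave
instance (semitones : List Int) (octave : Int) (out : List (Int × Int)) : Decidable (Spec_semitones_to_grid semitones octave out) := by unfold Spec_semitones_to_grid; infer_instance

-- ===== CLAIM (what is proved, stated in full; the proofs are below) =====
def Claim_equal_semitones_to_grid : Prop := ∀ (semitones : List Int) (octave : Int), Dom_semitones_to_grid semitones octave → Pre_semitones_to_grid semitones octave → Spec_semitones_to_grid semitones octave (semitones_to_grid semitones octave)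

-- ===== LEMMAS AND PROOFS =====

-- common recursive description of the per-element work after the first element
def gridCore (prev oct : Int) : List Int → List (Int × Int)
  | [] => []
  | s :: rest =>
      let cur := if s ≤ prev then oct + 1 else oct
      (cur * 7 + (gridOf s).1, (gridOf s).2) :: gridCore s cur rest

-- A's fold, generalized over the accumulator/state
theorem foldA_eq_gridCore (rest : List Int) (acc : List (Int × Int)) (oct prev : Int) :
    (rest.foldl
      (fun (st : List (Int × Int) × Int × Int) semitone =>
        let current_octave := if semitone ≤ st.2.2 then st.2.1 + 1 else st.2.1
        let cb := gridOf semitone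
        (st.1 ++ [(current_octave * 7 + cb.1, cb.2)], current_octave, semitone))
      (acc, oct, prev)).1 = acc ++ gridCore prev oct rest := by
  induction rest generalizing acc oct prev with
  | nil => simp [gridCore]
  | cons s rs ih =>
      simp only [List.foldl, gridCore]
      rw [ih]
      by_cases h : s ≤ prev <;> simp [h]

-- prefix sums of a list of increments
def prefixSums (a : Int) : List Int → List Int
  | [] => []
  | d :: ds => (a + d) :: prefixSums (a + d) ds

theorem foldB_eq_prefixSums (inds : List Int) (a : Int) (out : List Int) :
    (inds.foldl (fun (st : Int × List Int) d => (st.1 + d, st.2 ++ [st.1 + d])) (a, out)).2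
      = out ++ prefixSums a inds := by
  induction inds generalizing a out with
  | nil => simp [prefixSums]
  | cons d ds ih => simp [List.foldl, prefixSums, ih]

-- B's tail stages compute gridCore
theorem zipmap_eq_gridCore (rest : List Int) (prev oct : Int) :
    (((prefixSums oct (((prev :: rest).zip rest).map
        (fun p => if p.2 ≤ p.1 then (1 : Int) else 0))).zip rest).map
      (fun p => (p.1 * 7 + (gridOf p.2).1, (gridOf p.2).2))) = gridCore prev oct rest := by
  induction rest generalizing prev oct with
  | nil => simp [prefixSums, gridCore]
  | cons r rs ih =>
      simp only [List.zip_cons_cons, List.map_cons, prefixSums, gridCore]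
      by_cases h : r ≤ prev <;> simp [h, ih]

-- ===== VERDICT (by name: the statement is the Claim_ definition above) =====
theorem semitones_to_grid_spec : Claim_equal_semitones_to_grid := by
  intro semitones octave _hDom hPre
  unfold Spec_semitones_to_grid semitones_to_grid semitones_to_grid_alt
  cases semitones with
  | nil => simp
  | cons s rest =>
      have hs : ¬ s ≤ (-1 : Int) := by
        have := (hPre s (by simp)).1; omega
      simp only [List.foldl, List.tail_cons]
      rw [foldA_eq_gridCore]
      rw [foldB_eq_prefixSums]
      simp only [List.nil_append, prefixSums, add_zero, List.singleton_append, List.zip_cons_cons, List.map_cons]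
      rw [zipmap_eq_gridCore]
      simp [hs]
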